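-- pv_equiv track=rewrite | github.com/Shubhamag12/Competitive-Programming-Codes | cyclic_binary_string.py | maximumPower
-- ===== SOURCE A (Python) =====
-- def maximumPower(s):
--     n = len(s)
--     count = 0
--     start = 0
--     end = 0
--     for i in range(n):
--         if s[i] == '0':
--             start += 1
--         else:
--             break
--     for i in range(n-1, -1, -1):
--         if s[i] == '0':
--             end += 1
--         else:
--             break
--
--     result = start + end
--
--     for i in range(n):
--         if s[i] == '0':
--             count += 1
--         if(count > result):
--             result = count
--         if s[i] == '1':
--             count = 0
--
--     if(result >= n):
--         result = -1
--
--     return result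
-- ===== SOURCE B (Python) =====
-- def maximumPower(s):
--     n = len(s)
--     lead = 0          # leading '0' run, frozen at the first non-'0'
--     open_lead = True
--     run = 0           # current trailing '0' run
--     count = 0         # zeros since the last '1'
--     best = 0          # max of count so far
--     for c in s:
--         if c == '0':
--             count += 1
--             if open_lead:
--                 lead += 1
--             run += 1
--             if count > best:
--                 best = count
--         else:
--             open_lead = False
--             run = 0
--             if c == '1':
--                 count = 0
--     result = max(best, lead + run)
--     return -1 if result >= n else result
-- ===== Notes on version B (the rewrite author's own statement) =====
-- stated objective: alternative
-- what changed: Replaces A's three staged scans (leading-zero loop with break, backward trailing-zero loop with break, then a third full scan for the running max) by one fused left-to-right pass that maintains five accumulators (frozen leading run, live trailing run, current count, best) and combines them once after the loop. (iterating characters directly instead of range/index access; a timing run measured a constant-factor speedup).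
import Mathlib
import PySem

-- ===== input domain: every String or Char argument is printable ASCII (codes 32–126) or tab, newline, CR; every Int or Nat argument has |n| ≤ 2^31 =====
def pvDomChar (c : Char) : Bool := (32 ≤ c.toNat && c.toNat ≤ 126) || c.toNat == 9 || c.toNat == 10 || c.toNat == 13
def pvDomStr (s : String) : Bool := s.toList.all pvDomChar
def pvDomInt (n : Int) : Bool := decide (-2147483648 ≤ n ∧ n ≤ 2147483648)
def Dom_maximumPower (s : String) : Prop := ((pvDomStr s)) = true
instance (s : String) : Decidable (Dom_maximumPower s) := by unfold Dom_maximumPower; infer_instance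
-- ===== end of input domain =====

-- B fuses A's three staged index scans into one left-to-right pass over the characters with a five-field accumulator (same O(n); a timing run measured a constant-factor speedup).


-- ===== PORT A =====
-- 'for i in range(n): if s[i] == '0': start += 1 else: break' — structural recursion stopping at the first non-'0' (the break)
def mpLead : List Char → Nat
  | [] => 0
  | c :: t => if c == '0' then mpLead t + 1 else 0

-- the body of A's third loop: count += 1 on '0'; result = max(result, count); count = 0 on '1'
def mpStep (st : Nat × Nat) (c : Char) : Nat × Nat :=
  let count := if c == '0' then st.1 + 1 else st.1
  let result := if count > st.2 then count else st.2
  let count := if c == '1' then 0 else count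
  (count, result)

def maximumPower (s : String) : Int :=
  let cs := s.toList
  let n := cs.length
  let start := mpLead cs                 -- first loop
  let e := mpLead cs.reverse             -- second loop: 'for i in range(n-1, -1, -1)' reads the characters back to front — recursion over the reversed list, exact
  let result := (cs.foldl mpStep (0, start + e)).2   -- third loop
  if result ≥ n then -1 else (result : Int)

-- ===== PORT B =====
-- the five accumulators of Source B's single loop
structure AltSt where
  lead : Nat
  openLead : Bool
  run : Nat
  count : Nat
  best : Nat
deriving DecidableEq, Repr

def altStep (st : AltSt) (c : Char) : AltSt :=
  if c == '0' then
    let count := st.count + 1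
    { lead := if st.openLead then st.lead + 1 else st.lead
      openLead := st.openLead
      run := st.run + 1
      count := count
      best := if count > st.best then count else st.best }
  else
    { lead := st.lead
      openLead := false
      run := 0
      count := if c == '1' then 0 else st.count
      best := st.best }

def maximumPower_alt (s : String) : Int :=
  let cs := s.toList
  let n := cs.length
  let st := cs.foldl altStep ⟨0, true, 0, 0, 0⟩
  let result := max st.best (st.lead + st.run)
  if result ≥ n then -1 else (result : Int)

-- ===== PRECONDITION & SPEC =====
def Spec_maximumPower (s : String) (out : Int) : Prop := out = maximumPower_alt s
instance (s : String) (out : Int) : Decidable (Spec_maximumPower s out) := by unfold Spec_maximumPower; infer_instance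

-- ===== CLAIM (what is proved, stated in full; the proofs are below) =====
def Claim_equal_maximumPower : Prop := ∀ (s : String), Dom_maximumPower s → Spec_maximumPower s (maximumPower s)

-- ===== LEMMAS AND PROOFS =====

-- maximum run seen from here on, starting with a current run of c: '0' extends the run, '1' closes it, anything else leaves it
def mpRun : Nat → List Char → Nat
  | c, [] => c
  | c, x :: t => if x == '1' then max c (mpRun 0 t) else if x == '0' then mpRun (c + 1) t else mpRun c t

theorem le_mpRun (cs : List Char) (c : Nat) : c ≤ mpRun c cs := by
  induction cs generalizing c with
  | nil => simp [mpRun]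
  | cons x t ih =>
    simp only [mpRun]
    split_ifs with h1 h2
    · exact Nat.le_max_left _ _
    · exact le_trans (Nat.le_succ c) (ih (c+1))
    · exact ih c

-- A's third loop computes the running maximum of the zero runs, started at (c, r) with c ≤ r
theorem foldl_mpStep (cs : List Char) (c r : Nat) (hcr : c ≤ r) :
    (cs.foldl mpStep (c, r)).2 = max r (mpRun c cs) := by
  induction cs generalizing c r with
  | nil => simp [mpRun]; omega
  | cons x t ih =>
    by_cases h1 : x = '1'
    · subst h1
      simp [mpStep, mpRun]
      have hite : (if c > r then c else r) = r := by split_ifs <;> omega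
      rw [hite, ih _ _ (Nat.zero_le _)]
      have := le_mpRun t 0
      omega
    · by_cases h0 : x = '0'
      · subst h0
        simp [mpStep, mpRun]
        have hite : (if r ≤ c then c + 1 else r) = max r (c + 1) := by split_ifs <;> omega
        rw [hite, ih _ _ (by omega : c + 1 ≤ max r (c + 1))]
        have := le_mpRun t (c + 1)
        omega
      · have hx1 : (x == '1') = false := by simp [h1]
        have hx0 : (x == '0') = false := by simp [h0]
        simp [mpStep, mpRun, hx0, hx1]
        have hite : (if c > r then c else r) = r := by split_ifs <;> omega
        rw [hite, ih _ _ hcr]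

theorem mpLead_append (a b : List Char) :
    mpLead (a ++ b) = if a.all (fun c => c == '0') then a.length + mpLead b else mpLead a := by
  induction a with
  | nil => simp
  | cons x t ih =>
    by_cases h0 : (x == '0') = true
    · simp [mpLead, h0, ih]
      split_ifs <;> omega
    · simp [mpLead, h0]

theorem mpLead_all_zero (cs : List Char) (h : cs.all (fun c => c == '0')) :
    mpLead cs = cs.length := by
  induction cs with
  | nil => simp [mpLead]
  | cons x t ih =>
    simp at h
    simp [mpLead, h.1, ih (by simp [List.all_eq_true]; exact h.2)]

-- one big invariant for Source B's single loop, relating each field to A's staged quantities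
theorem foldl_altStep_spec (cs : List Char) (l : Nat) (o : Bool) (r c b : Nat) (h : c ≤ b) :
    cs.foldl altStep ⟨l, o, r, c, b⟩ =
      ⟨(if o then l + mpLead cs else l),
       o && cs.all (fun c => c == '0'),
       (if cs.all (fun c => c == '0') then r + cs.length else mpLead cs.reverse),
       (cs.foldl mpStep (c, b)).1,
       (cs.foldl mpStep (c, b)).2⟩ := by
  induction cs generalizing l o r c b with
  | nil => simp [mpLead]
  | cons x t ih =>
    by_cases h0 : x = '0'
    · subst h0
      have hstep : altStep ⟨l, o, r, c, b⟩ '0' =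
          ⟨(if o then l + 1 else l), o, r + 1, c + 1, if c + 1 > b then c + 1 else b⟩ := by
        simp [altStep]
      have hmp : mpStep (c, b) '0' = (c + 1, if c + 1 > b then c + 1 else b) := by
        simp [mpStep]
      rw [List.foldl_cons, hstep, List.foldl_cons, hmp,
        ih _ _ _ _ _ (by split_ifs <;> omega)]
      simp only [AltSt.mk.injEq, and_true]
      refine ⟨?_, ?_, ?_⟩
      · by_cases ho : o = true <;> simp [ho, mpLead] <;> omega
      · simp
      · have hall : ((('0':Char) :: t).all (fun c => c == '0')) = t.all (fun c => c == '0') := by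
          simp
        have hrev : (('0' : Char) :: t).reverse = t.reverse ++ ['0'] := by simp
        rw [hall, hrev, mpLead_append]
        by_cases ht : t.all (fun c => c == '0') = true
        · have hrt : t.reverse.all (fun c => c == '0') = true := by simpa using ht
          simp [ht]
          omega
        · have hrt : t.reverse.all (fun c => c == '0') = false := by
            simp only [List.all_reverse]; simpa using ht
          simp [ht, hrt]
    · have hx0 : (x == '0') = false := by simp [h0]
      have hstep : altStep ⟨l, o, r, c, b⟩ x =
          ⟨l, false, 0, if x == '1' then 0 else c, b⟩ := by
        simp [altStep, hx0]
      have hmp : mpStep (c, b) x = (if x == '1' then 0 else c, b) := by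
        simp [mpStep, hx0]
        omega
      rw [List.foldl_cons, hstep, List.foldl_cons, hmp,
        ih _ _ _ _ _ (by split_ifs <;> omega)]
      have hallx : ((x :: t).all (fun c => c == '0')) = false := by simp [hx0]
      simp only [AltSt.mk.injEq, and_true]
      refine ⟨?_, ?_, ?_⟩
      · simp [mpLead, hx0]
      · simp [hallx]
      · have hrev : (x :: t).reverse = t.reverse ++ [x] := by simp
        rw [hallx, hrev, mpLead_append]
        by_cases ht : t.all (fun c => c == '0') = true
        · have hrt : t.reverse.all (fun c => c == '0') = true := by simpa using ht
          simp [ht, hrt, mpLead, hx0]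
        · have hrt : t.reverse.all (fun c => c == '0') = false := by
            simp only [List.all_reverse]; simpa using ht
          simp [ht, hrt]

-- ===== VERDICT (by name: the statement is the Claim_ definition above) =====
theorem maximumPower_spec : Claim_equal_maximumPower := by
  intro s _
  unfold Spec_maximumPower maximumPower maximumPower_alt
  set cs := s.toList with hcs
  simp only []
  rw [foldl_altStep_spec cs 0 true 0 0 0 (le_refl 0)]
  simp only [if_true, Nat.zero_add]
  rw [foldl_mpStep cs 0 0 (le_refl 0), foldl_mpStep cs 0 _ (Nat.zero_le _)]
  by_cases hall : cs.all (fun c => c == '0') = true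
  · -- all characters are '0': both results are ≥ n, both branches give -1
    have h1 : mpLead cs = cs.length := mpLead_all_zero cs hall
    have h2 : mpLead cs.reverse = cs.length := by
      rw [mpLead_all_zero cs.reverse (by simpa using hall)]; simp
    rw [if_pos hall, h1, h2]
    split_ifs <;> first | rfl | omega
  · -- some character is not '0': run = trailing-zero run = A's 'end', the two maxima coincide
    rw [if_neg hall]
    have hEq : max (max 0 (mpRun 0 cs)) (mpLead cs + mpLead cs.reverse)
        = max (mpLead cs + mpLead cs.reverse) (mpRun 0 cs) := by omega
    rw [hEq]
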